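-- pv_equiv track=rewrite | github.com/mdn/yari | uplift-locales.py | get_frontmatter
-- ===== SOURCE A (Python) =====
-- def get_frontmatter(text):
--     markers = 0
--     lines = []
--     for line in text.splitlines():
--         lines.append(line)
--         if line == "---":
--             markers += 1
--             if markers >= 2:
--                 break
--
--     return "\n".join(lines)
-- ===== SOURCE B (Python) =====
-- def get_frontmatter(text):
--     lines = text.splitlines()
--     idxs = [i for i, l in enumerate(lines) if l == "---"]
--     cut = idxs[1] + 1 if len(idxs) >= 2 else len(lines)
--     return "\n".join(lines[:cut])
-- ===== Notes on version B (the rewrite author's own statement) =====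
-- stated objective: alternative
-- what changed: B replaces A's stateful accumulate-with-counter-and-break loop by building an index table of all marker lines and taking a single slice up to the second marker.
import Mathlib
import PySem

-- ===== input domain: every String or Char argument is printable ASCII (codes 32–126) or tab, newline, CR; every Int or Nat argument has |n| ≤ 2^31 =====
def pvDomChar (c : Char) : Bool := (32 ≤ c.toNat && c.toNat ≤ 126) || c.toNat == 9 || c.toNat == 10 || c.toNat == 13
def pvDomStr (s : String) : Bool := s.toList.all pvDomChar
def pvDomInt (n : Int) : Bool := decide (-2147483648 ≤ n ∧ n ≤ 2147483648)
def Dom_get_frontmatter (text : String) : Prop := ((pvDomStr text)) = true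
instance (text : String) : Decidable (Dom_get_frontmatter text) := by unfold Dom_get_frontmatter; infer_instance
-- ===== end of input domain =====

-- B builds an index table of marker lines and slices once, instead of A's counter-and-break accumulation loop; objective: alternative decomposition.

-- ===== PORT A =====
-- A's loop: append each line, count "---" markers, break at the second.
def getFmLoopA : List String → Nat → List String
  | [], _ => []
  | l :: rest, markers =>
    if l == "---" then
      if markers + 1 ≥ 2 then [l]
      else l :: getFmLoopA rest (markers + 1)
    else l :: getFmLoopA rest markers

def get_frontmatter (text : String) : String :=
  PySem.Str.join "\n" (getFmLoopA (PySem.Str.splitlines text) 0)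

-- ===== PORT B =====
-- the comprehension [i for i, l in enumerate(lines) if l == "---"], index counter carried explicitly
def getFmIdxs : Nat → List String → List Nat
  | _, [] => []
  | i, l :: rest => if l == "---" then i :: getFmIdxs (i + 1) rest else getFmIdxs (i + 1) rest

def get_frontmatter_alt (text : String) : String :=
  let lines := PySem.Str.splitlines text
  let idxs := getFmIdxs 0 lines
  let cut := if idxs.length ≥ 2 then idxs[1]! + 1 else lines.length
  PySem.Str.join "\n" (lines.take cut)

-- ===== PRECONDITION & SPEC =====
def Spec_get_frontmatter (text : String) (out : String) : Prop := out = get_frontmatter_alt text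
instance (text : String) (out : String) : Decidable (Spec_get_frontmatter text out) := by unfold Spec_get_frontmatter; infer_instance

-- ===== CLAIM (what is proved, stated in full; the proofs are below) =====
def Claim_equal_get_frontmatter : Prop := ∀ (text : String), Dom_get_frontmatter text → Spec_get_frontmatter text (get_frontmatter text)

-- ===== LEMMAS AND PROOFS =====

lemma getFmIdxs_shift (r : List String) : ∀ i, getFmIdxs i r = (getFmIdxs 0 r).map (· + i) := by
  induction r with
  | nil => intro i; simp [getFmIdxs]
  | cons l rest ih =>
    intro i
    by_cases h : l = "---"
    · simp only [getFmIdxs, beq_iff_eq, h, if_true, ih 1, ih (i + 1), List.map_cons,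
        List.map_map, Nat.zero_add]
      congr 1
      exact List.map_congr_left fun x _ => by simp; omega
    · simp only [getFmIdxs, beq_iff_eq, if_neg h, ih 1, ih (i + 1), List.map_map]
      refine List.map_congr_left fun x _ => ?_
      simp; omega

-- B's cut as a match on the index list
def getFmCut (lines : List String) : Nat :=
  match getFmIdxs 0 lines with
  | _ :: j :: _ => j + 1
  | _ => lines.length

lemma getFmCut_eq (lines : List String) :
    (if (getFmIdxs 0 lines).length ≥ 2 then (getFmIdxs 0 lines)[1]! + 1 else lines.length)
      = getFmCut lines := by
  unfold getFmCut
  rcases h : getFmIdxs 0 lines with _ | ⟨a, _ | ⟨b, t⟩⟩ <;> simp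

-- A's loop after the first marker: take up to (and including) the next marker
lemma getFmLoopA_one (lines : List String) :
    getFmLoopA lines 1 =
      lines.take (match getFmIdxs 0 lines with | j :: _ => j + 1 | [] => lines.length) := by
  induction lines with
  | nil => simp [getFmLoopA, getFmIdxs]
  | cons l rest ih =>
    by_cases h : l = "---"
    · simp [getFmLoopA, getFmIdxs, h]
    · simp only [getFmLoopA, getFmIdxs, beq_iff_eq, if_neg h]
      rw [ih, getFmIdxs_shift rest 1]
      rcases getFmIdxs 0 rest with _ | ⟨j, t⟩ <;> simp

lemma getFmLoopA_zero (lines : List String) :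
    getFmLoopA lines 0 = lines.take (getFmCut lines) := by
  induction lines with
  | nil => simp [getFmLoopA, getFmCut, getFmIdxs]
  | cons l rest ih =>
    unfold getFmCut
    by_cases h : l = "---"
    · simp only [getFmLoopA, getFmIdxs, beq_iff_eq, h, if_true, Nat.reduceAdd,
        if_neg (by omega : ¬ 0 + 1 ≥ 2)]
      rw [getFmLoopA_one rest, getFmIdxs_shift rest 1]
      rcases getFmIdxs 0 rest with _ | ⟨j, t⟩ <;> simp
    · simp only [getFmLoopA, getFmIdxs, beq_iff_eq, if_neg h]
      rw [ih]
      unfold getFmCut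
      rw [getFmIdxs_shift rest 1]
      rcases getFmIdxs 0 rest with _ | ⟨a, _ | ⟨b, t⟩⟩ <;> simp

-- ===== VERDICT (by name: the statement is the Claim_ definition above) =====
theorem get_frontmatter_spec : Claim_equal_get_frontmatter := by
  intro text _
  unfold Spec_get_frontmatter get_frontmatter get_frontmatter_alt
  simp only [getFmCut_eq, getFmLoopA_zero]
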